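-- pv_equiv track=rewrite | github.com/rho5900/lc | 3827-count-monobit-integers/3827-count-monobit-integers.py | countMonobit
-- ===== SOURCE A (Python) =====
-- def countMonobit(n: int) -> int:
--     #1,2,4,8,16
--     #1,3,7,15,31
--     #2,3,4,5,6,7,8,9,10
--     #2^x -1
--
--     sqr = 0
--     cnts = 0
--     for x in range(0,n+1):
--         p = 2**sqr
--         if x + 1 == p:
--             cnts += 1
--             sqr += 1
--     return cnts
-- ===== SOURCE B (Python) =====
-- def countMonobit(n: int) -> int:
--     return 0 if n < 0 else (n + 1).bit_length()
-- ===== Notes on version B (the rewrite author's own statement) =====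
-- stated objective: faster
-- what changed: Replaced the linear loop that enumerates every candidate up to n while tracking the next power of two with a direct closed form: for nonnegative n the answer is the bit length of the successor of n, and zero for negative n.
import Mathlib
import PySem

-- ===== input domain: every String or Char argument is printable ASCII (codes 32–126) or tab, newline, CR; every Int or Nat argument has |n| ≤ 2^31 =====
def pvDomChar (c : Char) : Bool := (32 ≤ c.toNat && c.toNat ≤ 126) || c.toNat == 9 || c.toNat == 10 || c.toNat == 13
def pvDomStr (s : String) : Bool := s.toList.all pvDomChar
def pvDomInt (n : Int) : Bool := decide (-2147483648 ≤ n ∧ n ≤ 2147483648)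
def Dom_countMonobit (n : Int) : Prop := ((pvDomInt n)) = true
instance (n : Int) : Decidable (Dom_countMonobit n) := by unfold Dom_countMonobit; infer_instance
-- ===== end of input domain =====

-- B replaces A's O(n) scan over range(0, n+1) with the closed form (n+1).bit_length() (0 for n < 0): faster (asymptotic).

-- ===== PORT A =====
-- literal port of A's loop: state (sqr, cnts); 'sqr' is always ≥ 0 in execution, so 2**sqr = 2 ^ sqr.toNat is exact
def countMonobit (n : Int) : Int :=
  ((PySem.List.pyRange 0 (n + 1) 1).foldl
    (fun (st : Int × Int) x =>
      let p : Int := 2 ^ st.1.toNat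
      if x + 1 = p then (st.1 + 1, st.2 + 1) else st)
    (0, 0)).2

-- ===== PORT B =====
def countMonobit_alt (n : Int) : Int :=
  if n < 0 then 0 else (PySem.Int.bitLength (n + 1) : Int)

-- ===== PRECONDITION & SPEC =====
def Spec_countMonobit (n : Int) (out : Int) : Prop := out = countMonobit_alt n
instance (n : Int) (out : Int) : Decidable (Spec_countMonobit n out) := by unfold Spec_countMonobit; infer_instance

-- ===== CLAIM (what is proved, stated in full; the proofs are below) =====
def Claim_equal_countMonobit : Prop := ∀ (n : Int), Dom_countMonobit n → Spec_countMonobit n (countMonobit n)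

-- ===== LEMMAS AND PROOFS =====

-- bitLength is at least 1 on positive naturals
theorem pv_bl_pos (k : Nat) (hk : 0 < k) : 0 < PySem.Int.bitLength (k : Int) := by
  by_contra h
  have h0 : PySem.Int.bitLength (k : Int) = 0 := by omega
  have := PySem.Int.lt_two_pow_bitLength (k : Int)
  rw [h0] at this
  simp [Int.natAbs_natCast] at this
  omega

-- characterisation: if 2^(t-1) ≤ k < 2^t (t ≥ 1) then bitLength k = t
theorem pv_bl_char (k t : Nat) (ht : 0 < t) (h1 : 2 ^ (t - 1) ≤ k) (h2 : k < 2 ^ t) :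
    PySem.Int.bitLength (k : Int) = t := by
  have hk : 0 < k := lt_of_lt_of_le (Nat.pow_pos (by norm_num)) h1
  have hkne : (k : Int) ≠ 0 := by exact_mod_cast hk.ne'
  have hub := PySem.Int.lt_two_pow_bitLength (k : Int)
  have hlb := PySem.Int.two_pow_bitLength_le (k : Int) hkne
  rw [Int.natAbs_natCast] at hub hlb
  have hspos := pv_bl_pos k hk
  set s := PySem.Int.bitLength (k : Int) with hs
  -- 2^(t-1) ≤ k < 2^s  →  t-1 < s ; 2^(s-1) ≤ k < 2^t → s-1 < t
  have a1 : t - 1 < s := by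
    have : (2:Nat) ^ (t - 1) < 2 ^ s := lt_of_le_of_lt h1 hub
    exact (Nat.pow_lt_pow_iff_right (by norm_num)).mp this
  have a2 : s - 1 < t := by
    have : (2:Nat) ^ (s - 1) < 2 ^ t := lt_of_le_of_lt hlb h2
    exact (Nat.pow_lt_pow_iff_right (by norm_num)).mp this
  omega

-- step lemma: bitLength (m+1) in terms of bitLength m
theorem pv_bl_step_hit (m : Nat) (h : m + 1 = 2 ^ PySem.Int.bitLength (m : Int)) :
    PySem.Int.bitLength ((m + 1 : Nat) : Int) = PySem.Int.bitLength (m : Int) + 1 := by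
  apply pv_bl_char _ _ (by omega)
  · simpa using h.ge
  · have : m + 1 < 2 * 2 ^ PySem.Int.bitLength (m : Int) := by
      have : 0 < (2:Nat) ^ PySem.Int.bitLength (m : Int) := Nat.pow_pos (by norm_num)
      omega
    calc m + 1 < 2 * 2 ^ PySem.Int.bitLength (m : Int) := this
      _ = 2 ^ (PySem.Int.bitLength (m : Int) + 1) := by ring

theorem pv_bl_step_miss (m : Nat) (hm : 0 < m) (h : m + 1 ≠ 2 ^ PySem.Int.bitLength (m : Int)) :
    PySem.Int.bitLength ((m + 1 : Nat) : Int) = PySem.Int.bitLength (m : Int) := by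
  have hmne : (m : Int) ≠ 0 := by exact_mod_cast hm.ne'
  have hub := PySem.Int.lt_two_pow_bitLength (m : Int)
  have hlb := PySem.Int.two_pow_bitLength_le (m : Int) hmne
  rw [Int.natAbs_natCast] at hub hlb
  have hspos := pv_bl_pos m hm
  apply pv_bl_char _ _ hspos
  · omega
  · omega

-- the loop body of port A, named for the induction
def pvBody : Int × Int → Int → Int × Int := fun st x =>
  let p : Int := 2 ^ st.1.toNat
  if x + 1 = p then (st.1 + 1, st.2 + 1) else st

-- loop invariant: folding over [0, 1, …, m-1] yields (bitLength m, bitLength m)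
theorem pv_loop (m : Nat) :
    ((List.range m).map (fun (k : Nat) => ((0:Int) + (k:Int)))).foldl pvBody (0, 0) =
      ((PySem.Int.bitLength (m : Int) : Int), (PySem.Int.bitLength (m : Int) : Int)) := by
  induction m with
  | zero => simp [PySem.Int.bitLength_zero]
  | succ m ih =>
    rw [List.range_succ, List.map_append, List.foldl_append, ih]
    set s := PySem.Int.bitLength (m : Int) with hs
    simp only [List.map_cons, List.map_nil, List.foldl_cons, List.foldl_nil, pvBody]
    have htoNat : ((s : Int)).toNat = s := by simp
    by_cases h : m + 1 = 2 ^ s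
    · have hhit : ((0:Int) + (m:Int)) + 1 = 2 ^ ((s : Int)).toNat := by
        have h' : ((m:Int)) + 1 = (2:Int) ^ s := by exact_mod_cast h
        rw [htoNat]; linarith
      rw [if_pos hhit, pv_bl_step_hit m h]
      push_cast
      rw [hs]
    · rcases Nat.eq_zero_or_pos m with hm0 | hmpos
      · subst hm0
        exact absurd (by rw [hs]; simp) h
      · have hmiss : ¬ (((0:Int) + (m:Int)) + 1 = 2 ^ ((s : Int)).toNat) := by
          rw [htoNat]
          intro hc
          apply h
          have : ((m + 1 : Nat) : Int) = ((2 ^ s : Nat) : Int) := by push_cast; omega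
          exact_mod_cast this
        rw [if_neg hmiss]
        have := pv_bl_step_miss m hmpos h
        rw [this]

theorem pv_main (n : Int) : countMonobit n = countMonobit_alt n := by
  unfold countMonobit countMonobit_alt
  by_cases hn : n < 0
  · have hz : (n + 1 - 0).toNat = 0 := by omega
    rw [PySem.List.pyRange_one, hz, if_pos hn]
    simp
  · have hn' : 0 ≤ n := not_lt.mp hn
    lift n to ℕ using hn' with m
    have hm : ((m:Int) + 1 - 0).toNat = m + 1 := by omega
    rw [PySem.List.pyRange_one, hm, if_neg (by omega)]
    have := pv_loop (m + 1)
    rw [show (fun (st : Int × Int) x =>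
          let p : Int := 2 ^ st.1.toNat
          if x + 1 = p then (st.1 + 1, st.2 + 1) else st) = pvBody from rfl, this]
    push_cast
    ring

-- ===== VERDICT (by name: the statement is the Claim_ definition above) =====
theorem countMonobit_spec : Claim_equal_countMonobit := by
  intro n _
  exact pv_main n
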